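-- pv_equiv track=rewrite | github.com/MinShiGee/problem-solving-codes | pmrs-모의고사.py | solution
-- ===== SOURCE A (Python) =====
-- def solution(answers):
--     li = [[1,2,3,4,5],[2,1,2,3,2,4,2,5],[3,3,1,1,2,2,4,4,5,5]]
--     ans = [0,0,0]
--     for i in range(3):
--         for j, v in enumerate(answers):
--             if li[i][j % len(li[i])] != v:
--                 continue
--             ans[i] += 1
--     answer = [(1,ans[0]),(2,ans[1]),(3,ans[2])]
--     answer.sort(key=lambda x: -x[1])
--     res = [answer[0][0]]
--
--     if answer[0][1] == answer[1][1]: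
--         res.append(answer[1][0])
--         if answer[1][1] == answer[2][1]:
--             res.append(answer[2][0])
--
--     return res
-- ===== SOURCE B (Python) =====
-- def solution(answers):
--     # Bucket-count (index mod 40, answer) pairs in one pattern-independent pass
--     # (40 = lcm of the three pattern periods), then read each score off the table.
--     hist = {}
--     for j, v in enumerate(answers):
--         key = (j % 40, v)
--         hist[key] = hist.get(key, 0) + 1
--     patterns = [[1, 2, 3, 4, 5], [2, 1, 2, 3, 2, 4, 2, 5], [3, 3, 1, 1, 2, 2, 4, 4, 5, 5]]
--     scores = [sum(hist.get((r, p[r % len(p)]), 0) for r in range(40)) for p in patterns]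
--     best = max(scores)
--     return [i + 1 for i in range(3) if scores[i] == best]
-- ===== Notes on version B (the rewrite author's own statement) =====
-- stated objective: alternative
-- what changed: B builds a pattern-independent histogram (a dict) of (index mod 40, answer) pairs in one pass (40 = lcm of the three pattern periods), reads each pattern's score off the table with 40 lookups, and selects winners by max-and-filter, replacing A's three pattern-by-pattern scans and its tuple-sort-plus-manual-tie-chain ranking.
import Mathlib
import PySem

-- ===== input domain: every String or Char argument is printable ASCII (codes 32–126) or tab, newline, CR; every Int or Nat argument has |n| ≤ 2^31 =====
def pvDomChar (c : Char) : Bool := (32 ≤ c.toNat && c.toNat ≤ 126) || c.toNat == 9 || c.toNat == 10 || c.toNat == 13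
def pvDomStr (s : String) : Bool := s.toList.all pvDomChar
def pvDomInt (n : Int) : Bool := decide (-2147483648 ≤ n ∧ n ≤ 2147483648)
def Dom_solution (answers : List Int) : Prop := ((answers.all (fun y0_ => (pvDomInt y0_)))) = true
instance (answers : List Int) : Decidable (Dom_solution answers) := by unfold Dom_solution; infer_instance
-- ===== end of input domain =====

-- B replaces A's pattern-by-pattern scans and sort-plus-tie-chain by a pattern-independent
-- histogram of (index mod 40, answer) pairs (40 = lcm of the pattern periods), 40 table
-- lookups per score, and a max-and-filter selection (objective: alternative).

-- ===== PORT A =====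
-- Every list index in A is in range (li has 3 rows; j % len(li[i]) < len(li[i]); the sorted
-- `answer` list always has 3 entries), so in-range indexing is ported with getD, which is exact here.

def solution (answers : List Int) : List Int :=
  let li : List (List Int) := [[1,2,3,4,5],[2,1,2,3,2,4,2,5],[3,3,1,1,2,2,4,4,5,5]]
  let ans : List Int :=
    (PySem.List.pyRange 0 3 1).foldl (fun ans i =>
      let p := li.getD i.toNat []
      (PySem.List.enumerate answers).foldl (fun ans jv =>
        if p.getD (PySem.Int.mod jv.1 (p.length : Int)).toNat 0 != jv.2 then ans
        else ans.set i.toNat (ans.getD i.toNat 0 + 1)) ans) [0,0,0]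
  let answer : List (Int × Int) := [(1, ans.getD 0 0), (2, ans.getD 1 0), (3, ans.getD 2 0)]
  let answer := PySem.List.sorted answer (fun x => -x.2) false
  let res : List Int := [(answer.getD 0 (0,0)).1]
  if (answer.getD 0 (0,0)).2 == (answer.getD 1 (0,0)).2 then
    let res := res ++ [(answer.getD 1 (0,0)).1]
    if (answer.getD 1 (0,0)).2 == (answer.getD 2 (0,0)).2 then res ++ [(answer.getD 2 (0,0)).1]
    else res
  else res

-- ===== PORT B =====
-- hist is Python's dict keyed by the (j % 40, v) tuples; sum(...) over the generator is map+sum.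
def solution_alt (answers : List Int) : List Int :=
  let hist : PySem.Dict (Int × Int) Int :=
    (PySem.List.enumerate answers).foldl (fun h jv =>
      let key := (PySem.Int.mod jv.1 40, jv.2)
      h.insert key (h.getD key 0 + 1)) PySem.Dict.empty
  let patterns : List (List Int) := [[1,2,3,4,5],[2,1,2,3,2,4,2,5],[3,3,1,1,2,2,4,4,5,5]]
  let scores : List Int := patterns.map (fun p =>
    ((PySem.List.pyRange 0 40 1).map (fun r =>
      hist.getD (r, p.getD (PySem.Int.mod r (p.length : Int)).toNat 0) 0)).sum)
  let best := (PySem.List.max? scores (fun y => y)).getD 0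
  ((PySem.List.pyRange 0 3 1).filter (fun i => scores.getD i.toNat 0 == best)).map (fun i => i + 1)

-- ===== PRECONDITION & SPEC =====
def Spec_solution (answers : List Int) (out : List Int) : Prop := out = solution_alt answers
instance (answers : List Int) (out : List Int) : Decidable (Spec_solution answers out) := by unfold Spec_solution; infer_instance

-- ===== CLAIM (what is proved, stated in full; the proofs are below) =====
def Claim_equal_solution : Prop := ∀ (answers : List Int), Dom_solution answers → Spec_solution answers (solution answers)

-- ===== LEMMAS AND PROOFS =====

-- pvCntm p m l = number of enumerated answers matching pattern p under index mod m, as an Int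
def pvCntm (p : List Int) (m : Int) (l : List (Int × Int)) : Int :=
  ((l.filter (fun jv => p.getD (PySem.Int.mod jv.1 m).toNat 0 == jv.2)).length : Int)

-- the two ranking steps (A: sort + tie chain; B: max-and-filter) on three scores
def pvSelA (a b c : Int) : List Int :=
  let answer := PySem.List.sorted ([(1,a),(2,b),(3,c)] : List (Int × Int)) (fun x => -x.2) false
  let res : List Int := [(answer.getD 0 (0,0)).1]
  if (answer.getD 0 (0,0)).2 == (answer.getD 1 (0,0)).2 then
    let res := res ++ [(answer.getD 1 (0,0)).1]
    if (answer.getD 1 (0,0)).2 == (answer.getD 2 (0,0)).2 then res ++ [(answer.getD 2 (0,0)).1]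
    else res
  else res

def pvSelB (a b c : Int) : List Int :=
  let best := max a (max b c)
  (if a == best then [(1 : Int)] else []) ++
    (if b == best then [(2 : Int)] else []) ++
    (if c == best then [(3 : Int)] else [])

-- B's key function and its histogram score, on the proof side
def pvKey (jv : Int × Int) : Int × Int := (PySem.Int.mod jv.1 40, jv.2)

def pvScore (p : List Int) (l : List (Int × Int)) : Int :=
  ((List.range 40).map (fun (r : Nat) =>
    (((l.map pvKey).count (((r : Nat) : Int), p.getD (r % p.length) 0)) : Int))).sum

theorem pvInnerA (p : List Int) (l : List (Int × Int)) :
    ∀ (ans : List Int) (i : Nat), i < ans.length →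
    l.foldl (fun ans jv =>
        if p.getD (PySem.Int.mod jv.1 (p.length : Int)).toNat 0 != jv.2 then ans
        else ans.set i (ans.getD i 0 + 1)) ans
      = ans.set i (ans.getD i 0 + pvCntm p (p.length : Int) l) := by
  induction l with
  | nil =>
    intro ans i h
    simp only [List.foldl_nil, pvCntm, List.filter_nil, List.length_nil, Int.natCast_zero, add_zero]
    rw [List.getD_eq_getElem _ _ h, List.set_getElem_self]
  | cons x t ih =>
    intro ans i h
    simp only [List.foldl_cons]
    by_cases hx : (p.getD (PySem.Int.mod x.1 (p.length : Int)).toNat 0 != x.2) = true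
    · rw [if_pos hx, ih _ i h]
      simp only [pvCntm, List.filter_cons]
      rw [if_neg (by simpa [bne, List.getD] using hx)]
    · rw [if_neg hx, ih _ i (by simpa using h)]
      have hx' : (p.getD (PySem.Int.mod x.1 (p.length : Int)).toNat 0 = x.2) := by
        simpa [bne] using hx
      simp only [pvCntm, List.filter_cons, hx']
      rw [if_pos (by simp)]
      rw [List.set_set]
      have hg : (ans.set i (ans.getD i 0 + 1)).getD i 0 = ans.getD i 0 + 1 := by
        simp [List.getD, h]
      rw [hg]
      congr 1
      simp only [List.length_cons]
      push_cast
      ring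

theorem pvSel (a b c : Int) : pvSelA a b c = pvSelB a b c := by
  unfold pvSelA pvSelB
  simp only [PySem.List.sorted_eq_foldl_insertBy, List.foldl_cons, List.foldl_nil,
    PySem.List.insertBy, decide_eq_true_eq]
  rcases lt_or_ge (-b) (-a) with h1 | h1
  · rw [if_pos h1]
    try simp only [PySem.List.insertBy, decide_eq_true_eq]
    rcases lt_or_ge (-c) (-b) with h2 | h2
    · rw [if_pos h2]
      simp only [List.getD, List.getElem?_cons_zero, List.getElem?_cons_succ, Option.getD_some,
        beq_iff_eq, max_def, List.cons_append, List.nil_append]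
      split_ifs <;> first | rfl | (exfalso; omega)
    · rw [if_neg (not_lt.mpr h2)]
      try simp only [PySem.List.insertBy, decide_eq_true_eq]
      rcases lt_or_ge (-c) (-a) with h3 | h3
      · rw [if_pos h3]
        simp only [List.getD, List.getElem?_cons_zero, List.getElem?_cons_succ, Option.getD_some,
          beq_iff_eq, max_def, List.cons_append, List.nil_append]
        split_ifs <;> first | rfl | (exfalso; omega)
      · rw [if_neg (not_lt.mpr h3)]
        try simp only [PySem.List.insertBy, decide_eq_true_eq]
        simp only [List.getD, List.getElem?_cons_zero, List.getElem?_cons_succ, Option.getD_some,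
          beq_iff_eq, max_def, List.cons_append, List.nil_append]
        split_ifs <;> first | rfl | (exfalso; omega)
  · rw [if_neg (not_lt.mpr h1)]
    try simp only [PySem.List.insertBy, decide_eq_true_eq]
    rcases lt_or_ge (-c) (-a) with h2 | h2
    · rw [if_pos h2]
      simp only [List.getD, List.getElem?_cons_zero, List.getElem?_cons_succ, Option.getD_some,
        beq_iff_eq, max_def, List.cons_append, List.nil_append]
      split_ifs <;> first | rfl | (exfalso; omega)
    · rw [if_neg (not_lt.mpr h2)]
      try simp only [PySem.List.insertBy, decide_eq_true_eq]
      rcases lt_or_ge (-c) (-b) with h3 | h3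
      · rw [if_pos h3]
        simp only [List.getD, List.getElem?_cons_zero, List.getElem?_cons_succ, Option.getD_some,
          beq_iff_eq, max_def, List.cons_append, List.nil_append]
        split_ifs <;> first | rfl | (exfalso; omega)
      · rw [if_neg (not_lt.mpr h3)]
        try simp only [PySem.List.insertBy, decide_eq_true_eq]
        simp only [List.getD, List.getElem?_cons_zero, List.getElem?_cons_succ, Option.getD_some,
          beq_iff_eq, max_def, List.cons_append, List.nil_append]
        split_ifs <;> first | rfl | (exfalso; omega)

theorem solution_eq (answers : List Int) :
    solution answers
      = pvSelA (pvCntm [1,2,3,4,5] 5 (PySem.List.enumerate answers))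
          (pvCntm [2,1,2,3,2,4,2,5] 8 (PySem.List.enumerate answers))
          (pvCntm [3,3,1,1,2,2,4,4,5,5] 10 (PySem.List.enumerate answers)) := by
  unfold solution
  rw [show PySem.List.pyRange 0 3 1 = [0, 1, 2] from rfl]
  simp only [List.foldl_cons, List.foldl_nil, List.getD_cons_zero, List.getD_cons_succ,
    show ((0:Int).toNat) = 0 from rfl, show ((1:Int).toNat) = 1 from rfl,
    show ((2:Int).toNat) = 2 from rfl]
  rw [pvInnerA _ _ _ 0 (by simp), pvInnerA _ _ _ 1 (by simp), pvInnerA _ _ _ 2 (by simp)]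
  simp only [List.set_cons_zero, List.set_cons_succ, List.getD_cons_zero, List.getD_cons_succ,
    zero_add]
  rfl

-- indicator sums over List.range: zero when the target index is out of range,
-- one hit when it is in range
theorem pvSumInd0 (g : Nat → Int) (v : Int) (j : Nat) :
    ∀ n : Nat, n ≤ j →
    ((List.range n).map (fun (r : Nat) => if (((r : Nat) : Int), g r) = ((j : Int), v) then (1:Int) else 0)).sum
      = 0 := by
  intro n
  induction n with
  | zero => intro _; simp
  | succ n ih =>
    intro h
    rw [List.range_succ, List.map_append, List.sum_append, ih (by omega)]
    simp only [List.map_cons, List.map_nil, List.sum_cons, List.sum_nil, zero_add, add_zero]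
    rw [if_neg (by intro he; have := congrArg Prod.fst he; simp at this; omega)]

theorem pvSumInd (g : Nat → Int) (v : Int) (j : Nat) :
    ∀ n : Nat, j < n →
    ((List.range n).map (fun (r : Nat) => if (((r : Nat) : Int), g r) = ((j : Int), v) then (1:Int) else 0)).sum
      = if g j = v then 1 else 0 := by
  intro n
  induction n with
  | zero => omega
  | succ n ih =>
    intro h
    rw [List.range_succ, List.map_append, List.sum_append]
    by_cases hj : j = n
    · subst hj
      rw [pvSumInd0 g v j j le_rfl]
      simp only [List.map_cons, List.map_nil, List.sum_cons, List.sum_nil, zero_add, add_zero]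
      have hiff : (((j : Nat) : Int), g j) = (((j : Nat) : Int), v) ↔ g j = v :=
        ⟨fun he => congrArg Prod.snd he, fun hv => by rw [hv]⟩
      rw [if_congr hiff rfl rfl]
    · have h0 : (if (((n : Nat) : Int), g n) = (((j : Nat) : Int), v) then (1:Int) else 0) = 0 := by
        rw [if_neg]
        intro he
        have := congrArg Prod.fst he
        simp at this
        omega
      rw [ih (by omega)]
      simp only [List.map_cons, List.map_nil, List.sum_cons, List.sum_nil, h0, add_zero]

-- histogram score = direct match count, for a pattern whose period divides 40
theorem pvScore_eq (p : List Int) (hd : p.length ∣ 40) :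
    ∀ (l : List (Int × Int)), (∀ jv ∈ l, ∃ k : Nat, jv.1 = (k : Int)) →
    pvScore p l = pvCntm p (p.length : Int) l := by
  intro l
  induction l with
  | nil => intro _; simp [pvScore, pvCntm]
  | cons x t ih =>
    intro hl
    obtain ⟨k, hk⟩ := hl x (List.mem_cons_self)
    have ht := ih (fun jv hjv => hl jv (List.mem_cons_of_mem _ hjv))
    have hkey : pvKey x = (((k % 40 : Nat) : Int), x.2) := by
      simp only [pvKey, hk]
      rw [show (40 : Int) = ((40 : Nat) : Int) from rfl, PySem.Int.mod_natCast]
    have hmod : PySem.Int.mod x.1 ((p.length : Nat) : Int) = ((k % p.length : Nat) : Int) := by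
      rw [hk, PySem.Int.mod_natCast]
    unfold pvScore at *
    simp only [List.map_cons, hkey]
    have hsplit : ∀ r : Nat,
        ((((((k % 40 : Nat) : Int), x.2) :: t.map pvKey).count ((r : Int), p.getD (r % p.length) 0)) : Int)
          = (((t.map pvKey).count ((r : Int), p.getD (r % p.length) 0)) : Int)
            + (if ((r : Int), p.getD (r % p.length) 0) = (((k % 40 : Nat) : Int), x.2) then (1:Int) else 0) := by
      intro r
      rw [List.count_cons]
      by_cases h : ((r : Int), p.getD (r % p.length) 0) = (((k % 40 : Nat) : Int), x.2)
      · rw [if_pos h, h]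
        simp only [beq_self_eq_true, if_true]
        push_cast; ring
      · rw [if_neg h]
        have hb : ((((k % 40 : Nat) : Int), x.2) == ((r : Int), p.getD (r % p.length) 0)) = false := by
          simp only [beq_eq_false_iff_ne, ne_eq]
          exact fun he => h he.symm
        simp only [hb, if_false, Bool.false_eq_true]
        push_cast; ring
    rw [List.map_congr_left (fun r _ => hsplit r), PySem.List.sum_map_add_int, ht,
      pvSumInd (fun (r : Nat) => p.getD (r % p.length) 0) x.2 (k % 40) 40 (Nat.mod_lt _ (by norm_num))]
    have hper : p.getD (k % 40 % p.length) 0 = p.getD (k % p.length) 0 := by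
      rw [Nat.mod_mod_of_dvd k hd]
    rw [hper]
    unfold pvCntm
    rw [List.filter_cons]
    simp only [hmod, Int.toNat_natCast]
    by_cases hv : p.getD (k % p.length) 0 = x.2
    · rw [if_pos hv, if_pos (by simpa [beq_iff_eq] using hv)]
      simp only [List.length_cons]
      push_cast
      ring
    · rw [if_neg hv, if_neg (by simpa [beq_iff_eq] using hv)]
      push_cast; ring

-- the port's dict lookups are counts over the mapped key list
theorem pvHistCount (answers : List Int) (kk : Int × Int) :
    ((PySem.List.enumerate answers).foldl (fun h jv =>
        let key := (PySem.Int.mod jv.1 40, jv.2)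
        h.insert key (h.getD key 0 + 1)) PySem.Dict.empty).getD kk 0
      = (((PySem.List.enumerate answers).map pvKey).count kk : Int) := by
  show ((PySem.List.enumerate answers).foldl (fun h jv =>
        h.insert (pvKey jv) (h.getD (pvKey jv) 0 + 1)) PySem.Dict.empty).getD kk 0
      = (((PySem.List.enumerate answers).map pvKey).count kk : Int)
  rw [← List.foldl_map (f := pvKey)
    (g := fun (h : PySem.Dict (Int × Int) Int) (key : Int × Int) => h.insert key (h.getD key 0 + 1)),
    PySem.Dict.getD_foldl_insert_add_one]
  simp

-- the port's per-pattern sum equals pvScore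
theorem pvPortScore (answers : List Int) (p : List Int) :
    ((PySem.List.pyRange 0 40 1).map (fun r =>
      (((PySem.List.enumerate answers).foldl (fun h jv =>
          let key := (PySem.Int.mod jv.1 40, jv.2)
          h.insert key (h.getD key 0 + 1)) PySem.Dict.empty).getD
        (r, p.getD (PySem.Int.mod r (p.length : Int)).toNat 0) 0))).sum
      = pvScore p (PySem.List.enumerate answers) := by
  rw [show PySem.List.pyRange 0 40 1 = (List.range 40).map (fun r : Nat => (r : Int)) from by decide]
  rw [List.map_map]
  unfold pvScore
  congr 1
  apply List.map_congr_left
  intro r _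
  simp only [Function.comp]
  rw [pvHistCount]
  congr 2
  rw [show ((p.length : Nat) : Int) = ((p.length : Nat) : Int) from rfl, PySem.Int.mod_natCast,
    Int.toNat_natCast]

-- enumerate indices are natural numbers
theorem pvEnumNat (answers : List Int) :
    ∀ jv ∈ PySem.List.enumerate answers, ∃ k : Nat, jv.1 = (k : Int) := by
  intro jv hjv
  rw [PySem.List.mem_enumerate_iff] at hjv
  obtain ⟨k, hk, rfl⟩ := hjv
  exact ⟨k, by simp⟩

-- B's final max-and-filter on a three-score list is pvSelB
theorem pvFinal (a b c : Int) :
    (((PySem.List.pyRange 0 3 1).filter (fun i =>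
        ([a,b,c] : List Int).getD i.toNat 0 == (PySem.List.max? [a,b,c] (fun y => y)).getD 0)).map
      (fun i => i + 1))
      = pvSelB a b c := by
  rw [PySem.List.max?_id_cons]
  rw [show PySem.List.pyRange 0 3 1 = [(0:Int), 1, 2] from rfl]
  simp only [List.foldl_cons, List.foldl_nil, Option.getD_some]
  unfold pvSelB
  rw [show max (max a b) c = max a (max b c) from max_assoc a b c]
  simp only [List.filter_cons, List.filter_nil,
    show ((0:Int).toNat) = 0 from rfl, show ((1:Int).toNat) = 1 from rfl,
    show ((2:Int).toNat) = 2 from rfl,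
    List.getD_cons_zero, List.getD_cons_succ]
  generalize max a (max b c) = M
  by_cases h1 : a = M <;> by_cases h2 : b = M <;> by_cases h3 : c = M <;>
    simp [h1, h2, h3]

theorem solution_alt_eq (answers : List Int) :
    solution_alt answers
      = pvSelB (pvCntm [1,2,3,4,5] 5 (PySem.List.enumerate answers))
          (pvCntm [2,1,2,3,2,4,2,5] 8 (PySem.List.enumerate answers))
          (pvCntm [3,3,1,1,2,2,4,4,5,5] 10 (PySem.List.enumerate answers)) := by
  unfold solution_alt
  simp only [List.map_cons, List.map_nil]
  rw [pvPortScore answers [1,2,3,4,5],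
    pvPortScore answers [2,1,2,3,2,4,2,5],
    pvPortScore answers [3,3,1,1,2,2,4,4,5,5]]
  rw [pvScore_eq [1,2,3,4,5] (by norm_num) _ (pvEnumNat answers),
    pvScore_eq [2,1,2,3,2,4,2,5] (by norm_num) _ (pvEnumNat answers),
    pvScore_eq [3,3,1,1,2,2,4,4,5,5] (by norm_num) _ (pvEnumNat answers)]
  exact pvFinal _ _ _

-- ===== VERDICT (by name: the statement is the Claim_ definition above) =====
theorem solution_spec : Claim_equal_solution := by
  intro answers _
  show solution answers = solution_alt answers
  rw [solution_eq, solution_alt_eq, pvSel]
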